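-- pv_equiv track=rewrite | github.com/ee474itm/2024-Project-Team2 | generating_video.py | remove_punctuation_inside_quotes
-- ===== SOURCE A (Python) =====
-- def remove_punctuation_inside_quotes(text):
--     result = []
--     toggle = False
--
--     for char in text:
--         if char == '"':
--             toggle = not toggle
--             result.append('"')
--         elif toggle:
--             if char == '.':
--                 result.append('<DOT>')
--             elif char == '!':
--                 result.append('<EXCL>')
--             elif char == '?':
--                 result.append('<QUES>')
--             else:
--                 result.append(char)
--         else:
--             result.append(char)
--
--     return ''.join(result)
-- ===== SOURCE B (Python) =====
-- def remove_punctuation_inside_quotes(text):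
--     def esc(part):
--         return part.replace('.', '<DOT>').replace('!', '<EXCL>').replace('?', '<QUES>')
--     parts = text.split('"')
--     return '"'.join(p if i % 2 == 0 else esc(p) for i, p in enumerate(parts))
-- ===== Notes on version B (the rewrite author's own statement) =====
-- stated objective: simpler
-- what changed: Replaces A's toggle-driven per-character loop (appending escaped tokens one char at a time) with a split-on-quote / bulk-replace-odd-parts / join pipeline.
import Mathlib
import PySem

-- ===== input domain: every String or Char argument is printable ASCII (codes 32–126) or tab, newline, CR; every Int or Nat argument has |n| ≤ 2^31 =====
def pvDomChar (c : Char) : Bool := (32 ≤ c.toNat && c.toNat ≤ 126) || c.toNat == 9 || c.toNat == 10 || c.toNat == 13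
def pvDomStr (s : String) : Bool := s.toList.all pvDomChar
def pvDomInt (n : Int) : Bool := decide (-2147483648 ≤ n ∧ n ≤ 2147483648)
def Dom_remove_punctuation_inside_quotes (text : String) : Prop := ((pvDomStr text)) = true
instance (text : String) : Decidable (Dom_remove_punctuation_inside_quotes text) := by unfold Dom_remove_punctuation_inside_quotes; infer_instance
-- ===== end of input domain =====

-- B replaces A's toggle-driven per-character loop by a split('"')/replace-odd-parts/join pipeline: a simpler decomposition, measured faster in a timing run (bulk str.replace vs per-char appends).


-- ===== PORT A =====
-- the body of A's 'for char in text' loop: state = (result, toggle)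
def pvStepA (st : List String × Bool) (c : Char) : List String × Bool :=
  if c = '"' then (st.1 ++ ["\""], !st.2)
  else if st.2 then
    if c = '.' then (st.1 ++ ["<DOT>"], st.2)
    else if c = '!' then (st.1 ++ ["<EXCL>"], st.2)
    else if c = '?' then (st.1 ++ ["<QUES>"], st.2)
    else (st.1 ++ [String.ofList [c]], st.2)
  else (st.1 ++ [String.ofList [c]], st.2)

def remove_punctuation_inside_quotes (text : String) : String :=
  PySem.Str.join "" (text.toList.foldl pvStepA ([], false)).1

-- ===== PORT B =====
-- B's esc(part): the three successive str.replace calls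
def pvEscB (p : String) : String :=
  PySem.Str.replace (PySem.Str.replace (PySem.Str.replace p "." "<DOT>") "!" "<EXCL>") "?" "<QUES>"

def remove_punctuation_inside_quotes_alt (text : String) : String :=
  let parts : List String := (PySem.Chars.splitOn text.toList ['"']).map String.ofList
  PySem.Str.join "\"" ((PySem.List.enumerate parts 0).map
    (fun ip => if PySem.Int.mod ip.1 2 == 0 then ip.2 else pvEscB ip.2))

-- ===== PRECONDITION & SPEC =====
def Spec_remove_punctuation_inside_quotes (text : String) (out : String) : Prop := out = remove_punctuation_inside_quotes_alt text
instance (text : String) (out : String) : Decidable (Spec_remove_punctuation_inside_quotes text out) := by unfold Spec_remove_punctuation_inside_quotes; infer_instance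

-- ===== CLAIM (what is proved, stated in full; the proofs are below) =====
def Claim_equal_remove_punctuation_inside_quotes : Prop := ∀ (text : String), Dom_remove_punctuation_inside_quotes text → Spec_remove_punctuation_inside_quotes text (remove_punctuation_inside_quotes text)

-- ===== LEMMAS AND PROOFS =====

-- per-character escaping, the common denominator of both programs
def pvEscC (c : Char) : List Char :=
  if c = '.' then "<DOT>".toList
  else if c = '!' then "<EXCL>".toList
  else if c = '?' then "<QUES>".toList
  else [c]

-- the common specification: A's toggle recursion on the character list
def pvG : Bool → List Char → List Char
  | _, [] => []
  | t, c :: cs =>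
      if c = '"' then '"' :: pvG (!t) cs
      else (if t then pvEscC c else [c]) ++ pvG t cs

-- ---- A side ----
theorem pvJoinFlat (xs : List (List Char)) : PySem.Chars.join [] xs = xs.flatten := by
  induction xs with
  | nil => exact PySem.Chars.join_nil _
  | cons x xs ih =>
    cases xs with
    | nil => simp [PySem.Chars.join_singleton]
    | cons y ys => rw [PySem.Chars.join_cons_cons]; simp_all

theorem pvAfold (cs : List Char) : ∀ (acc : List String) (t : Bool),
    ((cs.foldl pvStepA (acc, t)).1.map String.toList).flatten
      = (acc.map String.toList).flatten ++ pvG t cs := by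
  induction cs with
  | nil => intro acc t; simp [pvG]
  | cons c cs ih =>
    intro acc t
    by_cases hq : c = '"'
    · subst hq
      simp only [List.foldl_cons, pvStepA, ih, pvG]
      simp
    · by_cases ht : t
      · subst ht
        by_cases h1 : c = '.'
        · subst h1
          simp only [List.foldl_cons, pvStepA, if_neg hq, ih, pvG, pvEscC]
          simp
        · by_cases h2 : c = '!'
          · subst h2
            simp only [List.foldl_cons, pvStepA, if_neg hq, if_neg h1, ih, pvG, pvEscC]
            simp
          · by_cases h3 : c = '?'
            · subst h3
              simp only [List.foldl_cons, pvStepA, if_neg hq, if_neg h1, if_neg h2, ih, pvG, pvEscC]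
              simp
            · simp only [List.foldl_cons, pvStepA, if_neg hq, if_neg h1, if_neg h2, if_neg h3, ih, pvG, pvEscC]
              simp
      · simp only [List.foldl_cons, pvStepA, if_neg hq, if_neg ht, ih, pvG]
        simp [ht]

theorem pvA_eq (text : String) :
    remove_punctuation_inside_quotes text = String.ofList (pvG false text.toList) := by
  have h := pvAfold text.toList [] false
  simp only [List.map_nil, List.flatten_nil, List.nil_append] at h
  simp [remove_punctuation_inside_quotes, PySem.Str.join, pvJoinFlat, h]

-- ---- B side: characterising splitOn on the single-character separator '"' ----
def pvQsplit : List Char → List (List Char)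
  | [] => [[]]
  | c :: cs =>
      if c = '"' then [] :: pvQsplit cs
      else match pvQsplit cs with
        | [] => [[c]]
        | h :: t => (c :: h) :: t

theorem pvQsplit_ne_nil (cs : List Char) : pvQsplit cs ≠ [] := by
  cases cs with
  | nil => simp [pvQsplit]
  | cons c cs =>
    by_cases h : c = '"'
    · simp [pvQsplit, h]
    · simp only [pvQsplit, if_neg h]
      cases pvQsplit cs <;> simp

theorem pvSplitGo : ∀ (fuel : Nat) (cs cur : List Char) (acc : List (List Char)),
    cs.length ≤ fuel →
    PySem.Chars.splitOn.go ['"'] fuel cs cur acc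
      = acc.reverse ++ (match pvQsplit cs with
          | [] => []
          | h :: t => (cur.reverse ++ h) :: t) := by
  intro fuel
  induction fuel with
  | zero =>
    intro cs cur acc h
    have : cs = [] := List.length_eq_zero_iff.mp (Nat.le_zero.mp h)
    subst this
    rw [PySem.Chars.splitOn.go]
    simp [pvQsplit]
  | succ fuel ih =>
    intro cs cur acc h
    cases cs with
    | nil =>
      rw [PySem.Chars.splitOn.go]
      · simp [pvQsplit]
      · omega
    | cons c rest =>
      obtain ⟨hh, tt, hsp⟩ : ∃ hh tt, pvQsplit rest = hh :: tt := by
        cases hrest : pvQsplit rest with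
        | nil => exact absurd hrest (pvQsplit_ne_nil rest)
        | cons a b => exact ⟨a, b, rfl⟩
      by_cases hq : c = '"'
      · subst hq
        rw [PySem.Chars.splitOn.go]
        simp only [List.isPrefixOf, BEq.rfl, Bool.true_and, if_true, List.length_cons,
          List.length_nil, List.drop_succ_cons, List.drop_zero]
        rw [ih rest [] (cur.reverse :: acc) (by simpa using h)]
        simp [pvQsplit, hsp]
      · rw [PySem.Chars.splitOn.go]
        have hbe : (('"' == c) : Bool) = false := by
          simpa using fun hx => hq hx.symm
        simp only [List.isPrefixOf, Bool.and_true, hbe]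
        rw [ih rest (c :: cur) acc (by simpa using h)]
        simp [pvQsplit, if_neg hq, hsp]

theorem pvSplit_eq (cs : List Char) : PySem.Chars.splitOn cs ['"'] = pvQsplit cs := by
  unfold PySem.Chars.splitOn
  rw [pvSplitGo (cs.length + 1) cs [] [] (Nat.le_succ _)]
  cases h : pvQsplit cs with
  | nil => exact absurd h (pvQsplit_ne_nil cs)
  | cons a b => simp

-- ---- B side: characterising single-character replace ----
theorem pvReplaceGo (o : Char) (nw : List Char) :
    ∀ (fuel : Nat) (cs acc : List Char), cs.length ≤ fuel →
    PySem.Chars.replace.go [o] nw fuel cs acc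
      = acc.reverse ++ cs.flatMap (fun c => if c = o then nw else [c]) := by
  intro fuel
  induction fuel with
  | zero =>
    intro cs acc h
    have : cs = [] := List.length_eq_zero_iff.mp (Nat.le_zero.mp h)
    subst this
    rw [PySem.Chars.replace.go]
    simp
  | succ fuel ih =>
    intro cs acc h
    cases cs with
    | nil =>
      rw [PySem.Chars.replace.go]
      · simp
      · omega
    | cons c rest =>
      by_cases hc : c = o
      · subst hc
        rw [PySem.Chars.replace.go]
        simp only [List.isPrefixOf, BEq.rfl, Bool.true_and, if_true, List.length_cons,
          List.length_nil, List.drop_succ_cons, List.drop_zero]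
        rw [ih rest (nw.reverse ++ acc) (by simpa using h)]
        simp
      · rw [PySem.Chars.replace.go]
        have hbe : ((o == c) : Bool) = false := by
          simpa using fun hx => hc hx.symm
        simp only [List.isPrefixOf, Bool.and_true, hbe]
        rw [ih rest (c :: acc) (by simpa using h)]
        simp [hc]

theorem pvReplace_eq (cs : List Char) (o : Char) (nw : List Char) :
    PySem.Chars.replace cs [o] nw = cs.flatMap (fun c => if c = o then nw else [c]) := by
  rw [PySem.Chars.replace]
  simp only [List.isEmpty_cons, Bool.false_eq_true, if_false]
  exact pvReplaceGo o nw cs.length cs [] le_rfl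

theorem pvEscB_chars (p : List Char) :
    (pvEscB (String.ofList p)).toList = p.flatMap pvEscC := by
  simp only [pvEscB, PySem.Str.replace, String.toList_ofList]
  have hd : ("." : String).toList = ['.'] := rfl
  have he : ("!" : String).toList = ['!'] := rfl
  have hq : ("?" : String).toList = ['?'] := rfl
  rw [hd, he, hq, pvReplace_eq, pvReplace_eq, pvReplace_eq, List.flatMap_assoc, List.flatMap_assoc]
  congr 1
  funext c
  by_cases h1 : c = '.'
  · subst h1; decide
  · by_cases h2 : c = '!'
    · subst h2; decide
    · by_cases h3 : c = '?'
      · subst h3; decide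
      · simp [h1, h2, h3, pvEscC]

-- ---- B side: the enumerate / parity pipeline as an alternating recursion ----
def pvAltC : Bool → List (List Char) → List (List Char)
  | _, [] => []
  | t, p :: ps => (if t then p.flatMap pvEscC else p) :: pvAltC (!t) ps

theorem pvModFlip (i : Int) : (PySem.Int.mod (i + 1) 2 = 0) ↔ ¬ (PySem.Int.mod i 2 = 0) := by
  rw [PySem.Int.mod_eq_emod_of_pos (a := i + 1) (by norm_num),
    PySem.Int.mod_eq_emod_of_pos (a := i) (by norm_num)]
  omega

theorem pvBparts : ∀ (qs : List (List Char)) (i : Int),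
    (((PySem.List.enumerate (qs.map String.ofList) i).map
        (fun ip => if PySem.Int.mod ip.1 2 == 0 then ip.2 else pvEscB ip.2)).map String.toList)
      = pvAltC (decide (¬ PySem.Int.mod i 2 = 0)) qs := by
  intro qs
  induction qs with
  | nil => intro i; simp [pvAltC]
  | cons q qs ih =>
    intro i
    rw [List.map_cons, PySem.List.enumerate_cons, List.map_cons, List.map_cons, ih (i + 1)]
    by_cases h : PySem.Int.mod i 2 = 0
    · have h1 : ¬ PySem.Int.mod (i + 1) 2 = 0 := fun hx => (pvModFlip i).mp hx h
      have hb : ((PySem.Int.mod i 2 == 0) : Bool) = true := beq_iff_eq.mpr h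
      rw [if_pos hb, decide_eq_false (not_not_intro h), decide_eq_true h1]
      rw [show pvAltC false (q :: qs) = q :: pvAltC true qs from by simp [pvAltC]]
      rw [String.toList_ofList]
    · have h1 : PySem.Int.mod (i + 1) 2 = 0 := (pvModFlip i).mpr h
      have hb : ((PySem.Int.mod i 2 == 0) : Bool) = false := beq_eq_false_iff_ne.mpr h
      rw [if_neg (by rw [hb]; exact Bool.false_ne_true), decide_eq_true h, decide_eq_false (not_not_intro h1)]
      rw [show pvAltC true (q :: qs) = q.flatMap pvEscC :: pvAltC false qs from by simp [pvAltC]]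
      rw [pvEscB_chars]

-- ---- joining the parts back ----
theorem pvAltC_ne_nil (t : Bool) (qs : List (List Char)) (h : qs ≠ []) : pvAltC t qs ≠ [] := by
  cases qs with
  | nil => exact absurd rfl h
  | cons q qs => simp [pvAltC]

theorem pvJoin_cons_append (x y : List Char) (xs : List (List Char)) :
    PySem.Chars.join ['"'] ((x ++ y) :: xs) = x ++ PySem.Chars.join ['"'] (y :: xs) := by
  cases xs with
  | nil => simp [PySem.Chars.join_singleton]
  | cons z zs => rw [PySem.Chars.join_cons_cons, PySem.Chars.join_cons_cons]; simp

theorem pvMain : ∀ (cs : List Char) (t : Bool),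
    PySem.Chars.join ['"'] (pvAltC t (pvQsplit cs)) = pvG t cs := by
  intro cs
  induction cs with
  | nil =>
    intro t
    cases t <;> simp [pvQsplit, pvAltC, pvG, PySem.Chars.join_singleton]
  | cons c cs ih =>
    intro t
    obtain ⟨hh, tt, hsp⟩ : ∃ hh tt, pvQsplit cs = hh :: tt := by
      cases hrest : pvQsplit cs with
      | nil => exact absurd hrest (pvQsplit_ne_nil cs)
      | cons a b => exact ⟨a, b, rfl⟩
    by_cases hq : c = '"'
    · subst hq
      have hstep : pvQsplit ('"' :: cs) = [] :: pvQsplit cs := by simp [pvQsplit]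
      obtain ⟨z, zs, hz⟩ : ∃ z zs, pvAltC (!t) (pvQsplit cs) = z :: zs := by
        cases hx : pvAltC (!t) (pvQsplit cs) with
        | nil => exact absurd hx (pvAltC_ne_nil _ _ (by simp [hsp]))
        | cons a b => exact ⟨a, b, rfl⟩
      have hhead : pvAltC t ([] :: pvQsplit cs) = [] :: pvAltC (!t) (pvQsplit cs) := by
        cases t <;> simp [pvAltC]
      rw [hstep, hhead, hz, PySem.Chars.join_cons_cons, ← hz, ih (!t)]
      have : pvG t ('"' :: cs) = '"' :: pvG (!t) cs := by simp [pvG]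
      rw [this]
      simp
    · have hstep : pvQsplit (c :: cs) = (c :: hh) :: tt := by
        simp [pvQsplit, if_neg hq, hsp]
      have ihx := ih t
      rw [hsp] at ihx
      have hG : pvG t (c :: cs) = (if t then pvEscC c else [c]) ++ pvG t cs := by
        simp [pvG, if_neg hq]
      rw [hstep, hG]
      cases t with
      | false =>
        have h1 : pvAltC false ((c :: hh) :: tt) = (c :: hh) :: pvAltC true tt := by
          simp [pvAltC]
        have h2 : pvAltC false (hh :: tt) = hh :: pvAltC true tt := by simp [pvAltC]
        rw [h1, show (c :: hh) = [c] ++ hh from rfl, pvJoin_cons_append, ← h2, ihx]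
        simp
      | true =>
        have h1 : pvAltC true ((c :: hh) :: tt)
            = (pvEscC c ++ hh.flatMap pvEscC) :: pvAltC false tt := by
          simp [pvAltC]
        have h2 : pvAltC true (hh :: tt) = hh.flatMap pvEscC :: pvAltC false tt := by
          simp [pvAltC]
        rw [h1, pvJoin_cons_append, ← h2, ihx]
        simp

theorem pvB_eq (text : String) :
    remove_punctuation_inside_quotes_alt text = String.ofList (pvG false text.toList) := by
  simp only [remove_punctuation_inside_quotes_alt, PySem.Str.join, pvSplit_eq]
  rw [pvBparts (pvQsplit text.toList) 0]
  have h0 : (decide (¬ PySem.Int.mod (0 : Int) 2 = 0)) = false := by decide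
  rw [h0]
  have hsep : ("\"" : String).toList = ['"'] := rfl
  rw [hsep, pvMain]

-- ===== VERDICT (by name: the statement is the Claim_ definition above) =====
theorem remove_punctuation_inside_quotes_spec : Claim_equal_remove_punctuation_inside_quotes := by
  intro text _
  unfold Spec_remove_punctuation_inside_quotes
  rw [pvA_eq, pvB_eq]
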